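-- pv_equiv track=rewrite | github.com/json420/dbase32 | gen-full.py | iter_c
-- ===== SOURCE A (Python) =====
-- def build_reverse_iter(forward):
--     start = ord(min(forward))
--     end = ord(max(forward))
--     for i in range(256):
--         if start <= i <= end:
--             c = chr(i)
--             r = forward.find(c)
--             assert r < 32
--             if r < 0:
--                 r = 255
--         else:
--             c = None
--             r = 255
--         yield (r, c, i)
--
-- def do_iter(reverse):
--     buf = []
--     for (r, c, i) in reverse:
--         if c is None:
--             buf.append(str(r))
--             if len(buf) >= 16:
--                 yield buf
--                 buf = []
--         else:
--             if buf:
--                 yield buf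
--                 buf = []
--             yield (r, c, i)
--     if buf:
--         yield buf
--
-- def iter_c(name, forward):
--     start = ord(min(forward))
--     end = ord(max(forward))
--
--     reverse = tuple(build_reverse_iter(forward))
--
--     yield 'static const uint8_t {}_FORWARD[{}] = "{}";'.format(
--         name, len(forward), forward
--     )
--     yield 'static const uint8_t {}_REVERSE[{}] = {{'.format(
--         name, len(reverse)
--     )
--
--     for item in do_iter(reverse):
--         if isinstance(item, list):
--             yield '    {},'.format(','.join(item))
--         else:
--             (r, c, i) = item
--             yield '    {:>3},  // {!r} [{:>2}]'.format(r, c, i)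
--
--     yield '};'
-- ===== SOURCE B (Python) =====
-- def iter_c(name, forward):
--     start = ord(min(forward))
--     end = ord(max(forward))
--
--     yield 'static const uint8_t {}_FORWARD[{}] = "{}";'.format(
--         name, len(forward), forward
--     )
--     yield 'static const uint8_t {}_REVERSE[256] = {{'.format(name)
--
--     # closed form: indices < start and > end are exactly the 255-runs
--     def chunks(n):
--         for _ in range(n // 16):
--             yield '    ' + ','.join(['255'] * 16) + ','
--         if n % 16:
--             yield '    ' + ','.join(['255'] * (n % 16)) + ','
--
--     yield from chunks(start)
--     for i in range(start, end + 1):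
--         r = forward.find(chr(i))
--         if r < 0:
--             r = 255
--         yield '    {:>3},  // {!r} [{:>2}]'.format(r, chr(i), i)
--     yield from chunks(255 - end)
--     yield '};'
-- ===== Notes on version B (the rewrite author's own statement) =====
-- stated objective: simpler
-- what changed: Replaces the three-generator pipeline (build a 256-entry reverse tuple, re-buffer it in do_iter, format in iter_c) with a closed form: since chars are None exactly below start and above end, B directly emits start//16 and (255-end)//16 full '255'-run lines plus the remainders, and formats only the [start,end] entries in one loop, never materialising the reverse table or a run buffer.
import Mathlib
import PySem

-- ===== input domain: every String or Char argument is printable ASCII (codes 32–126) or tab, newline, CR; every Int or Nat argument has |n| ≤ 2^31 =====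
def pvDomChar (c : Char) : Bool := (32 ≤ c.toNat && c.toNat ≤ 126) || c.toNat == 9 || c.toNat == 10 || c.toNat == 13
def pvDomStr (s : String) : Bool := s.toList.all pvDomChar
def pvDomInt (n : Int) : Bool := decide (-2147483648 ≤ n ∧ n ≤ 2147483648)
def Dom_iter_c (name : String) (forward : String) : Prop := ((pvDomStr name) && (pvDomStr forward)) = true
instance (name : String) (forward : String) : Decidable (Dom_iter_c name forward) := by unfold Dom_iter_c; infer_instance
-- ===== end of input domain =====

-- B replaces A's three-generator pipeline (reverse tuple + run-buffer) by a closed-form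
-- emission of the 255-run lines (start//16 full chunks + remainder on each side) and one
-- formatting loop over [start,end]: simpler, no intermediate table or buffer.


-- shared formatting helpers (both Pythons use the same str.format machinery)
def hexDigitChar (n : Nat) : Char := if n < 10 then Char.ofNat (48 + n) else Char.ofNat (87 + n)

-- Python repr() of a 1-character string; exact for character codes 9..126 (all that occur under Dom_)
def pyReprChar (c : Char) : List Char :=
  let n := c.toNat
  if n = 9 then ['\'', '\\', 't', '\'']
  else if n = 10 then ['\'', '\\', 'n', '\'']
  else if n = 13 then ['\'', '\\', 'r', '\'']
  else if n < 32 then ['\'', '\\', 'x', hexDigitChar (n / 16), hexDigitChar (n % 16), '\'']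
  else if c = '\'' then ['"', '\'', '"']
  else if c = '\\' then ['\'', '\\', '\\', '\'']
  else ['\'', c, '\'']

-- '{:>w}'.format(…) right-justify with spaces
def padLeft (w : Nat) (ds : List Char) : List Char := List.replicate (w - ds.length) ' ' ++ ds

-- ','.join(bufs)
def joinComma (bufs : List (List Char)) : List Char := List.intercalate [','] bufs

-- '    {:>3},  // {!r} [{:>2}]'.format(r, c, i)
def fmtPair (r : Int) (c : Char) (i : Int) : List Char :=
  "    ".toList ++ padLeft 3 (PySem.Int.toChars r) ++ ",  // ".toList ++ pyReprChar c
    ++ " [".toList ++ padLeft 2 (PySem.Int.toChars i) ++ "]".toList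

-- '    {},'.format(','.join(buf))
def fmtBuf (buf : List (List Char)) : List Char := "    ".toList ++ joinComma buf ++ [',']

-- 'static const uint8_t {}_FORWARD[{}] = "{}";'.format(name, len(forward), forward)
def headerFwd (name forward : List Char) : List Char :=
  "static const uint8_t ".toList ++ name ++ "_FORWARD[".toList
    ++ PySem.Int.toChars (forward.length : Int) ++ "] = \"".toList ++ forward ++ "\";".toList

-- ===== PORT A =====
-- formats one item yielded by do_iter (the isinstance(item, list) branch of A's loop)
def fmtItem : Sum (List (List Char)) (Int × Char × Int) → List Char
  | Sum.inl buf => fmtBuf buf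
  | Sum.inr (r, c, i) => fmtPair r c i

-- build_reverse_iter(forward) as a list; the 'assert r < 32' raises outside Pre_ (the port just computes the value)
def buildReverseIter (forward : List Char) (start end_ : Int) : List (Int × Option Char × Int) :=
  (PySem.List.pyRange 0 256 1).map fun i =>
    if start ≤ i ∧ i ≤ end_ then
      let c := Char.ofNat i.toNat          -- chr(i); exact: i ∈ [0,255] here
      let r := PySem.Chars.find forward [c]
      let r := if r < 0 then (255 : Int) else r
      (r, some c, i)
    else ((255 : Int), none, i)

-- do_iter(reverse): yields either a buffered run (inl) or a (r, c, i) item (inr)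
def doIter : List (Int × Option Char × Int) → List (List Char) →
    List (Sum (List (List Char)) (Int × Char × Int))
  | [], buf => if buf.isEmpty then [] else [Sum.inl buf]
  | (r, c, i) :: rest, buf =>
    match c with
    | none =>
      let buf' := buf ++ [PySem.Int.toChars r]
      if 16 ≤ buf'.length then Sum.inl buf' :: doIter rest [] else doIter rest buf'
    | some c => (if buf.isEmpty then [] else [Sum.inl buf]) ++ (Sum.inr (r, c, i) :: doIter rest [])

def iter_c (name : String) (forward : String) : List String :=
  match PySem.List.min? forward.toList (fun c => c), PySem.List.max? forward.toList (fun c => c) with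
  | some mn, some mx =>
    let start : Int := mn.toNat        -- ord(min(forward))
    let end_ : Int := mx.toNat         -- ord(max(forward))
    let reverse := buildReverseIter forward.toList start end_
    ([headerFwd name.toList forward.toList,
      "static const uint8_t ".toList ++ name.toList ++ "_REVERSE[".toList
        ++ PySem.Int.toChars (reverse.length : Int) ++ "] = {".toList]
     ++ (doIter reverse []).map fmtItem
     ++ ["};".toList]).map String.mk
  | _, _ => []   -- min/max of an empty string: Python raises ValueError (outside Pre_)

-- ===== PORT B =====
-- chunks(n) of Source B: n // 16 full 16-run lines, then the n % 16 remainder line if nonempty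
def chunks255 (n : Int) : List (List Char) :=
  (PySem.List.pyRange 0 (PySem.Int.floordiv n 16) 1).map
      (fun _ => "    ".toList ++ joinComma (List.replicate 16 "255".toList) ++ [','])
  ++ (if PySem.Int.mod n 16 ≠ 0 then
        ["    ".toList ++ joinComma (List.replicate (PySem.Int.mod n 16).toNat "255".toList) ++ [',']]
      else [])

def iter_c_alt (name : String) (forward : String) : List String :=
  match PySem.List.min? forward.toList (fun c => c) with
  | none => []   -- min of an empty string raises in Python too
  | some mn =>
  match PySem.List.max? forward.toList (fun c => c) with
  | none => []
  | some mx =>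
    let start : Int := mn.toNat
    let end_ : Int := mx.toNat
    ([headerFwd name.toList forward.toList,
      "static const uint8_t ".toList ++ name.toList ++ "_REVERSE[256] = {".toList]
     ++ chunks255 start
     ++ (PySem.List.pyRange start (end_ + 1) 1).map (fun i =>
          let r := PySem.Chars.find forward.toList [Char.ofNat i.toNat]
          let r := if r < 0 then (255 : Int) else r
          fmtPair r (Char.ofNat i.toNat) i)
     ++ chunks255 (255 - end_)
     ++ ["};".toList]).map String.mk

-- ===== PRECONDITION & SPEC =====
-- Pre_ excludes exactly the inputs where A raises: empty forward (ValueError from min) and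
-- forwards where some character's first occurrence index is ≥ 32 (the 'assert r < 32' fails).
def Pre_iter_c (name : String) (forward : String) : Prop :=
  forward.toList ≠ [] ∧ forward.toList.all (fun c => forward.toList.idxOf c < 32) = true
instance (name : String) (forward : String) : Decidable (Pre_iter_c name forward) := by
  unfold Pre_iter_c; infer_instance

def pvWitness_iter_c : String × String := ("DB32", "ABCDEFG")

def Spec_iter_c (name : String) (forward : String) (out : List String) : Prop := out = iter_c_alt name forward
instance (name : String) (forward : String) (out : List String) : Decidable (Spec_iter_c name forward out) := by unfold Spec_iter_c; infer_instance

-- ===== CLAIM (what is proved, stated in full; the proofs are below) =====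
def Claim_equal_iter_c : Prop := ∀ (name : String) (forward : String), Dom_iter_c name forward → Pre_iter_c name forward → Spec_iter_c name forward (iter_c name forward)

-- ===== LEMMAS AND PROOFS =====

def b255 : List Char := "255".toList

theorem doIter_nones (js : List Int) : ∀ (rest : List (Int × Option Char × Int)) (m : Nat), m < 16 →
    doIter (js.map (fun i => ((255:Int), none, i)) ++ rest) (List.replicate m b255)
    = List.replicate ((m + js.length) / 16) (Sum.inl (List.replicate 16 b255))
      ++ doIter rest (List.replicate ((m + js.length) % 16) b255) := by
  induction js with
  | nil => intro rest m hm; simp [Nat.div_eq_of_lt hm, Nat.mod_eq_of_lt hm]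
  | cons j js ih =>
    intro rest m hm
    have h255 : PySem.Int.toChars 255 = b255 := by decide
    simp only [List.map_cons, List.cons_append, doIter, h255]
    rw [← List.replicate_succ']
    by_cases h16 : m + 1 = 16
    · rw [if_pos (by simp [h16])]
      rw [show (doIter (js.map (fun i => ((255:Int), none, i)) ++ rest) []) =
            doIter (js.map (fun i => ((255:Int), none, i)) ++ rest) (List.replicate 0 b255) by simp,
          ih rest 0 (by omega)]
      rw [h16, List.length_cons,
          show (m + (js.length + 1)) / 16 = (0 + js.length) / 16 + 1 by omega,
          show (m + (js.length + 1)) % 16 = (0 + js.length) % 16 by omega]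
      simp [List.replicate_succ]
    · rw [if_neg (by simp; omega)]
      rw [ih rest (m+1) (by omega), List.length_cons,
          show m + 1 + js.length = m + (js.length + 1) by omega]

theorem doIter_somes (ps : List (Int × Char × Int)) : ∀ (rest : List (Int × Option Char × Int)),
    doIter (ps.map (fun p => (p.1, some p.2.1, p.2.2)) ++ rest) []
    = ps.map (fun p => Sum.inr p) ++ doIter rest [] := by
  induction ps with
  | nil => intro rest; simp
  | cons p ps ih =>
    intro rest
    obtain ⟨r, c, i⟩ := p
    simp only [List.map_cons, List.cons_append, doIter, List.isEmpty_nil, ih]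
    simp

theorem doIter_flush (r : Int) (c : Char) (i : Int) (rest : List (Int × Option Char × Int)) (m : Nat) :
    doIter ((r, some c, i) :: rest) (List.replicate m b255)
    = (if m = 0 then [] else [Sum.inl (List.replicate m b255)]) ++ (Sum.inr (r, c, i) :: doIter rest []) := by
  simp only [doIter, List.isEmpty_replicate]
  by_cases h : m = 0 <;> simp [h]

theorem doIter_nil_buf (m : Nat) :
    doIter [] (List.replicate m b255)
    = if m = 0 then [] else [Sum.inl (List.replicate m b255)] := by
  simp only [doIter, List.isEmpty_replicate]
  by_cases h : m = 0 <;> simp [h]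

theorem chunks255_natCast (k : Nat) :
    chunks255 (k : Int)
    = List.replicate (k / 16) (fmtBuf (List.replicate 16 b255))
      ++ (if k % 16 = 0 then [] else [fmtBuf (List.replicate (k % 16) b255)]) := by
  have h1 : PySem.Int.floordiv (k:Int) 16 = ((k/16 : Nat) : Int) := by
    exact_mod_cast PySem.Int.floordiv_natCast k 16
  have h2 : PySem.Int.mod (k:Int) 16 = ((k%16 : Nat) : Int) := by
    exact_mod_cast PySem.Int.mod_natCast k 16
  unfold chunks255 fmtBuf b255
  rw [h1, h2, PySem.List.pyRange_one]
  by_cases h : k % 16 = 0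
  · simp [h, Function.comp_def, List.map_const']
    omega
  · simp [h, Function.comp_def, List.map_const']
    rw [if_neg (by omega), show ((k:Int)/16).toNat = k/16 by omega,
        show ((k:Int)%16).toNat = k%16 by omega]

-- the whole body of A (reverse table + do_iter + formatting) in B's closed form
theorem A_body (fw : List Char) (s e : Int) (h0 : 0 ≤ s) (hse : s ≤ e) (he : e ≤ 126) :
    (doIter (buildReverseIter fw s e) []).map fmtItem
    = chunks255 s
      ++ (PySem.List.pyRange s (e + 1) 1).map (fun i =>
            let r := PySem.Chars.find fw [Char.ofNat i.toNat]
            let r := if r < 0 then (255:Int) else r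
            fmtPair r (Char.ofNat i.toNat) i)
      ++ chunks255 (255 - e) := by
  have hmain : buildReverseIter fw s e
      = (PySem.List.pyRange 0 s 1).map (fun i => ((255:Int), none, i))
        ++ ((((PySem.List.pyRange s (e+1) 1).map (fun i =>
              (if PySem.Chars.find fw [Char.ofNat i.toNat] < 0 then (255:Int)
                 else PySem.Chars.find fw [Char.ofNat i.toNat],
               Char.ofNat i.toNat, i))).map (fun p => (p.1, some p.2.1, p.2.2)))
           ++ (PySem.List.pyRange (e+1) 256 1).map (fun i => ((255:Int), none, i))) := by
    unfold buildReverseIter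
    rw [PySem.List.pyRange_one_append 0 s 256 h0 (by omega),
        PySem.List.pyRange_one_append s (e+1) 256 (by omega) (by omega),
        List.map_append, List.map_append, List.map_map]
    congr 1
    · exact List.map_congr_left (fun i hi => by
        have h := (PySem.List.mem_pyRange_one).mp hi
        rw [if_neg (by omega)])
    congr 1
    · exact List.map_congr_left (fun i hi => by
        have h := (PySem.List.mem_pyRange_one).mp hi
        rw [Function.comp_apply, if_pos ⟨by omega, by omega⟩])
    · exact List.map_congr_left (fun i hi => by
        have h := (PySem.List.mem_pyRange_one).mp hi
        rw [if_neg (by omega)])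
  rw [hmain]
  have h1 := doIter_nones (PySem.List.pyRange 0 s 1)
      ((((PySem.List.pyRange s (e+1) 1).map (fun i =>
              (if PySem.Chars.find fw [Char.ofNat i.toNat] < 0 then (255:Int)
                 else PySem.Chars.find fw [Char.ofNat i.toNat],
               Char.ofNat i.toNat, i))).map (fun p => (p.1, some p.2.1, p.2.2)))
           ++ (PySem.List.pyRange (e+1) 256 1).map (fun i => ((255:Int), none, i))) 0 (by omega)
  simp only [List.replicate_zero, Nat.zero_add, PySem.List.length_pyRange_one, Int.sub_zero] at h1
  rw [h1]
  rw [PySem.List.pyRange_one_cons (show s < e+1 by omega), List.map_cons, List.map_cons,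
      List.cons_append, doIter_flush]
  rw [doIter_somes]
  have h2 := doIter_nones (PySem.List.pyRange (e+1) 256 1) [] 0 (by omega)
  simp only [List.replicate_zero, Nat.zero_add, PySem.List.length_pyRange_one, List.append_nil] at h2
  rw [h2, doIter_nil_buf]
  have hc1 : chunks255 s = List.replicate (s.toNat / 16) (fmtBuf (List.replicate 16 b255))
      ++ (if s.toNat % 16 = 0 then [] else [fmtBuf (List.replicate (s.toNat % 16) b255)]) := by
    rw [show s = ((s.toNat : Nat) : Int) by omega]; exact chunks255_natCast _
  have hc2 : chunks255 (255 - e) = List.replicate ((256 - (e+1)).toNat / 16) (fmtBuf (List.replicate 16 b255))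
      ++ (if (256 - (e+1)).toNat % 16 = 0 then [] else [fmtBuf (List.replicate ((256 - (e+1)).toNat % 16) b255)]) := by
    rw [show (255 - e : Int) = (((256 - (e+1)).toNat : Nat) : Int) by omega]; exact chunks255_natCast _
  rw [hc1, hc2]
  simp only [List.map_append, List.map_replicate, List.map_cons, List.map_map, apply_ite (List.map fmtItem),
             List.map_nil, fmtItem, Function.comp_def, List.append_assoc, List.cons_append]

-- ===== VERDICT (by name: the statement is the Claim_ definition above) =====
theorem iter_c_spec : Claim_equal_iter_c := by
  intro name forward hdom hpre
  obtain ⟨hne, -⟩ := hpre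
  unfold Spec_iter_c
  obtain ⟨mn, hmn⟩ : ∃ mn, PySem.List.min? forward.toList (fun c => c) = some mn := by
    cases h : PySem.List.min? forward.toList (fun c => c) with
    | none => exact absurd ((PySem.List.min?_eq_none_iff forward.toList (fun c => c)).mp h) hne
    | some mn => exact ⟨mn, rfl⟩
  obtain ⟨mx, hmx⟩ : ∃ mx, PySem.List.max? forward.toList (fun c => c) = some mx := by
    cases h : PySem.List.max? forward.toList (fun c => c) with
    | none => exact absurd ((PySem.List.max?_eq_none_iff forward.toList (fun c => c)).mp h) hne
    | some mx => exact ⟨mx, rfl⟩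
  have hmnmem : mn ∈ forward.toList := PySem.List.min?_mem hmn
  have hmxmem : mx ∈ forward.toList := PySem.List.max?_mem hmx
  have hle : mn ≤ mx := PySem.List.min?_isMin hmn mx hmxmem
  have hdf : pvDomStr forward = true := by
    unfold Dom_iter_c at hdom
    exact (Bool.and_eq_true_iff.mp hdom).2
  have hdomc : ∀ c ∈ forward.toList, 9 ≤ c.toNat ∧ c.toNat ≤ 126 := by
    intro c hc
    have := (List.all_eq_true.mp hdf) c hc
    unfold pvDomChar at this
    simp only [Bool.or_eq_true, Bool.and_eq_true, decide_eq_true_eq, beq_iff_eq] at this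
    omega
  have hs0 : (0:Int) ≤ (mn.toNat : Int) := by positivity
  have hsee : (mn.toNat : Int) ≤ (mx.toNat : Int) := by
    have h := Fin.mk_le_mk.mp hle
    exact_mod_cast h
  have he126 : (mx.toNat : Int) ≤ 126 := by
    have := (hdomc mx hmxmem).2
    omega
  simp only [iter_c, iter_c_alt, hmn, hmx]
  apply congrArg (List.map String.mk)
  have hlen : (buildReverseIter forward.toList (mn.toNat:Int) (mx.toNat:Int)).length = 256 := by
    unfold buildReverseIter
    simp [PySem.List.length_pyRange_one]
  rw [hlen, A_body forward.toList _ _ hs0 hsee he126]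
  simp only [List.cons_append, List.nil_append]
  congr 1
  congr 1
  simp only [List.append_assoc]
  congr 2
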